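-- pv_equiv track=rewrite | github.com/aryan-mishra1404/TestAstro1 | chaldeanNumerology.py | getSoulNumber
-- ===== SOURCE A (Python) =====
-- def getSoulNumber(nameList):
--     sn =0
--     for ch in nameList:
--         if (ch == 'A' or ch == 'I'):
--             sn += 1
--         if (ch == 'E'):
--             sn += 5
--         if (ch == 'U'):
--             sn += 6
--         if (ch == 'O'):
--             sn += 7
--     if(sn == 11 or sn ==22):
--         return sn
--     num1 = sn%10
--     num2 = (int( sn/10))
--     sn = num1+num2
--     return sn
-- ===== SOURCE B (Python) =====
-- _WEIGHTS = {'A': 1, 'I': 1, 'E': 5, 'U': 6, 'O': 7}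
--
-- def _vowelSum(seg):
--     # divide and conquer: weighted vowel sum of seg via a weight table
--     if len(seg) == 0:
--         return 0
--     if len(seg) == 1:
--         return _WEIGHTS.get(seg[0], 0)
--     mid = len(seg) // 2
--     return _vowelSum(seg[:mid]) + _vowelSum(seg[mid:])
--
-- def getSoulNumber(nameList):
--     sn = _vowelSum(list(nameList))
--     if sn == 11 or sn == 22:
--         return sn
--     return sn % 10 + sn // 10
-- ===== Notes on version B (the rewrite author's own statement) =====
-- stated objective: alternative
-- what changed: Replaces the per-character branch-accumulator loop with a weight table (dict) and a divide-and-conquer recursion that splits the list in halves and sums weighted lookups, keeping the 11/22 single-step reduction tail.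
import Mathlib
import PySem

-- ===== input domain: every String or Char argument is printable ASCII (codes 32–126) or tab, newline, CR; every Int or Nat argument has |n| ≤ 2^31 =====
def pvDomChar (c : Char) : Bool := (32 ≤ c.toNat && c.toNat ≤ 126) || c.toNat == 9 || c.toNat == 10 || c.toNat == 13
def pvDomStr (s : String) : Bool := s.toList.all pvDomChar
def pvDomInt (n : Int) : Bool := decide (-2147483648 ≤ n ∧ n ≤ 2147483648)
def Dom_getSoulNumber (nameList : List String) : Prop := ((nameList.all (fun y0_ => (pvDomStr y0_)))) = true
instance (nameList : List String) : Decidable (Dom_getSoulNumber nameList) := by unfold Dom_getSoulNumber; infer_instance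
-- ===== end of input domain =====

-- B replaces the per-character branch chain with a weight table consulted by a
-- divide-and-conquer recursion over list halves (objective: alternative); same reduction tail.
-- ===== PORT A =====
def getSoulNumber (nameList : List String) : Int :=
  let sn : Int := nameList.foldl (fun sn ch =>
    let sn := if ch == "A" || ch == "I" then sn + 1 else sn
    let sn := if ch == "E" then sn + 5 else sn
    let sn := if ch == "U" then sn + 6 else sn
    if ch == "O" then sn + 7 else sn) 0
  if sn == 11 || sn == 22 then sn
  else
    -- num1 = sn % 10; num2 = int(sn/10): truncation of sn/10 toward zero,
    -- exact as Int.tdiv here since sn is a small nonnegative int (sum of positives)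
    PySem.Int.mod sn 10 + sn.tdiv 10

-- ===== PORT B =====
-- _WEIGHTS = {'A': 1, 'I': 1, 'E': 5, 'U': 6, 'O': 7}
def pvWeights : PySem.Dict String Int :=
  PySem.Dict.ofList [("A", 1), ("I", 1), ("E", 5), ("U", 6), ("O", 7)]

-- _vowelSum: divide and conquer over list halves; seg[0] ported as headD (exact: the
-- branch guarantees len(seg) == 1)
def pvVowelSum (seg : List String) : Int :=
  if seg.length = 0 then 0
  else if seg.length = 1 then pvWeights.getD (seg.headD "") 0
  else
    let mid := seg.length / 2
    pvVowelSum (seg.take mid) + pvVowelSum (seg.drop mid)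
termination_by seg.length
decreasing_by
  · simp only [List.length_take]; omega
  · simp only [List.length_drop]; omega

def getSoulNumber_alt (nameList : List String) : Int :=
  let sn : Int := pvVowelSum nameList
  if sn == 11 || sn == 22 then sn
  else PySem.Int.mod sn 10 + PySem.Int.floordiv sn 10

-- ===== PRECONDITION & SPEC =====
def Spec_getSoulNumber (nameList : List String) (out : Int) : Prop := out = getSoulNumber_alt nameList
instance (nameList : List String) (out : Int) : Decidable (Spec_getSoulNumber nameList out) := by unfold Spec_getSoulNumber; infer_instance

-- ===== CLAIM =====
def Claim_equal_getSoulNumber : Prop := ∀ (nameList : List String), Dom_getSoulNumber nameList → Spec_getSoulNumber nameList (getSoulNumber nameList)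

-- ===== LEMMAS AND PROOFS =====
-- the weight of one string under the table
def pvw (x : String) : Int := pvWeights.getD x 0

theorem pvw_spec (x : String) :
    pvw x = if x == "A" || x == "I" then 1
      else if x == "E" then 5 else if x == "U" then 6 else if x == "O" then 7 else 0 := by
  have h : pvWeights = PySem.Dict.mk [("A", 1), ("I", 1), ("E", 5), ("U", 6), ("O", 7)] := by
    decide
  simp only [pvw, h, PySem.Dict.getD_eq_get?_getD, PySem.Dict.get?_mk_cons]
  by_cases hA : "A" = x <;> by_cases hI : "I" = x <;> by_cases hE : "E" = x <;>
    by_cases hU : "U" = x <;> by_cases hO : "O" = x <;> simp_all [ne_comm] <;> split_ifs <;> simp_all [PySem.Dict.get?]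

-- the divide-and-conquer sum is the map-sum of weights
theorem pvVowelSum_eq (seg : List String) : pvVowelSum seg = (seg.map pvw).sum := by
  induction seg using pvVowelSum.induct with
  | case1 seg h => simp [pvVowelSum, List.length_eq_zero_iff.mp h]
  | case2 seg h0 h1 =>
    obtain ⟨x, hx⟩ := List.length_eq_one_iff.mp h1
    subst hx
    simp [pvVowelSum, pvw]
  | case3 seg h0 h1 mid ih1 ih2 =>
    rw [pvVowelSum]
    simp only [h0, h1, if_false]
    rw [ih1, ih2, ← List.sum_append, ← List.map_append, List.take_append_drop]

-- A's loop is the same map-sum of weights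
theorem pv_fold_eq (l : List String) (a : Int) :
    l.foldl (fun sn ch =>
      let sn := if ch == "A" || ch == "I" then sn + 1 else sn
      let sn := if ch == "E" then sn + 5 else sn
      let sn := if ch == "U" then sn + 6 else sn
      if ch == "O" then sn + 7 else sn) a
    = a + (l.map pvw).sum := by
  induction l generalizing a with
  | nil => simp
  | cons x xs ih =>
    simp only [List.foldl_cons, ih, List.map_cons, List.sum_cons, pvw_spec]
    by_cases hA : x = "A" <;> by_cases hI : x = "I" <;> by_cases hE : x = "E" <;>
      by_cases hU : x = "U" <;> by_cases hO : x = "O" <;> simp_all <;> ring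

theorem pv_sum_nonneg (l : List String) : 0 ≤ (l.map pvw).sum := by
  induction l with
  | nil => simp
  | cons x xs ih =>
    simp only [List.map_cons, List.sum_cons]
    have : 0 ≤ pvw x := by
      rw [pvw_spec]; split_ifs <;> norm_num
    omega

-- ===== VERDICT =====
theorem getSoulNumber_spec : Claim_equal_getSoulNumber := by
  intro nameList _
  unfold Spec_getSoulNumber getSoulNumber getSoulNumber_alt
  rw [pv_fold_eq, pvVowelSum_eq, zero_add]
  set sn : Int := (nameList.map pvw).sum with hsn
  have hnn : 0 ≤ sn := pv_sum_nonneg nameList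
  by_cases h : (sn == 11 || sn == 22) = true
  · simp [h]
  · simp only [h]
    rw [Int.tdiv_eq_ediv_of_nonneg hnn,
      PySem.Int.floordiv_eq_ediv_of_pos (a := sn) (b := 10) (by norm_num)]
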